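-- pv_equiv track=rewrite | github.com/LetsGitStartedAlready/groupeats-system | cgi-bin/CuisineRecommendation.py | buildWeightArray
-- ===== SOURCE A (Python) =====
-- def buildWeightArray(input, weightNum):
--     firstInput = input
--     weights = []
--     weights.append(input)
--     input -= 1
--     while (input > 0):
--         if (weightNum < firstInput):
--             weights[0] += input
--             weightNum += 1
--             input -= 1
--         else:
--             weights.append(input)
--             input -=1
--     return weights
-- ===== SOURCE B (Python) =====
-- def buildWeightArray(input, weightNum):
--     n = input
--     steps = max(n - 1, 0)
--     m = min(max(n - weightNum, 0), steps)
--     head = n + m * (2 * n - m - 1) // 2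
--     return [head] + list(range(n - 1 - m, 0, -1))
-- ===== Notes on version B (the rewrite author's own statement) =====
-- stated objective: faster
-- what changed: Replaces the decrement-by-one while loop with a closed-form arithmetic-series sum for weights[0] plus a range() for the descending tail.
import Mathlib
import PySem

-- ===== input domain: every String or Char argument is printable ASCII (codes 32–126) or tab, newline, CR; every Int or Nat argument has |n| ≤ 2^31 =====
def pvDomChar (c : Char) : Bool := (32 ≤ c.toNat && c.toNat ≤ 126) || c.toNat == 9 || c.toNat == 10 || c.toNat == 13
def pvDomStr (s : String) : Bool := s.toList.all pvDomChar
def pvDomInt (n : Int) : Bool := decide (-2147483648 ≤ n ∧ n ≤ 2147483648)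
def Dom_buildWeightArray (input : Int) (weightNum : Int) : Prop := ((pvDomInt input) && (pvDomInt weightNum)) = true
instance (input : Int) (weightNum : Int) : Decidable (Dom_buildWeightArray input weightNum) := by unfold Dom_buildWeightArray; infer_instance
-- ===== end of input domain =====

-- B computes weights[0] by a closed-form arithmetic-series sum and the tail by a range, removing A's O(input) loop.

-- ===== PORT A =====
-- the while loop of A; weights is always nonempty (it starts as [input]), so the
-- 'weights[0] += input' update is the head update of the cons cell.
def buildWeightArrayLoop (input weightNum firstInput : Int) (weights : List Int) : List Int :=
  if _h : 0 < input then
    if weightNum < firstInput then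
      buildWeightArrayLoop (input - 1) (weightNum + 1) firstInput
        (match weights with | [] => [] | h :: t => (h + input) :: t)
    else
      buildWeightArrayLoop (input - 1) weightNum firstInput (weights ++ [input])
  else weights
termination_by input.toNat
decreasing_by all_goals omega

def buildWeightArray (input : Int) (weightNum : Int) : List Int :=
  buildWeightArrayLoop (input - 1) weightNum input [input]

-- ===== PORT B =====
def buildWeightArray_alt (input : Int) (weightNum : Int) : List Int :=
  let n := input
  let steps := max (n - 1) 0
  let m := min (max (n - weightNum) 0) steps
  let head := n + PySem.Int.floordiv (m * (2 * n - m - 1)) 2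
  head :: PySem.List.pyRange (n - 1 - m) 0 (-1)

-- ===== PRECONDITION & SPEC =====
def Spec_buildWeightArray (input : Int) (weightNum : Int) (out : List Int) : Prop := out = buildWeightArray_alt input weightNum
instance (input : Int) (weightNum : Int) (out : List Int) : Decidable (Spec_buildWeightArray input weightNum out) := by unfold Spec_buildWeightArray; infer_instance

-- ===== CLAIM (what is proved, stated in full; the proofs are below) =====
def Claim_equal_buildWeightArray : Prop := ∀ (input : Int) (weightNum : Int), Dom_buildWeightArray input weightNum → Spec_buildWeightArray input weightNum (buildWeightArray input weightNum)

-- ===== LEMMAS AND PROOFS =====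

/-- sum of the k consecutive integers x, x-1, …, x-k+1 -/
def sumDesc : Nat → Int → Int
  | 0, _ => 0
  | k + 1, x => x + sumDesc k (x - 1)

lemma two_mul_sumDesc : ∀ (k : Nat) (x : Int), 2 * sumDesc k x = k * (2 * x - k + 1) := by
  intro k
  induction k with
  | zero => intro x; simp [sumDesc]
  | succ k ih =>
    intro x
    have h := ih (x - 1)
    simp only [sumDesc]
    push_cast at h ⊢
    ring_nf
    ring_nf at h
    omega

lemma loop_eq : ∀ (fuel : Nat) (input w f h : Int) (t : List Int), input.toNat ≤ fuel →
    buildWeightArrayLoop input w f (h :: t) =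
      (h + sumDesc (min (max (f - w) 0) (max input 0)).toNat input) ::
        (t ++ PySem.List.pyRange (input - min (max (f - w) 0) (max input 0)) 0 (-1)) := by
  intro fuel
  induction fuel with
  | zero =>
    intro input w f h t hle
    have hin : input ≤ 0 := by omega
    rw [buildWeightArrayLoop]
    have hm : min (max (f - w) 0) (max input 0) = 0 := by omega
    rw [hm]
    simp only [sub_zero]
    have hni : ¬ (0 : Int) < input := by omega
    simp [hni, sumDesc, PySem.List.pyRange_neg_one_eq_nil (by omega : input ≤ (0:Int))]
  | succ fuel ih =>
    intro input w f h t hle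
    by_cases hin : 0 < input
    · rw [buildWeightArrayLoop]
      simp only [hin, dite_true]
      by_cases hw : w < f
      · simp only [hw, if_true]
        rw [ih (input - 1) (w + 1) f (h + input) t (by omega)]
        have hm : (min (max (f - w) 0) (max input 0)).toNat =
            (min (max (f - (w + 1)) 0) (max (input - 1) 0)).toNat + 1 := by omega
        have hm2 : input - min (max (f - w) 0) (max input 0) =
            input - 1 - min (max (f - (w + 1)) 0) (max (input - 1) 0) := by omega
        rw [hm, hm2]
        simp only [sumDesc]
        ring_nf
      · simp only [hw, if_false]
        have : (h :: t) ++ [input] = h :: (t ++ [input]) := rfl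
        rw [this, ih (input - 1) w f h (t ++ [input]) (by omega)]
        have hwf : f - w ≤ 0 := by omega
        have hm : min (max (f - w) 0) (max input 0) = 0 := by omega
        have hm' : min (max (f - w) 0) (max (input - 1) 0) = 0 := by omega
        rw [hm, hm']
        simp only [sub_zero]
        rw [PySem.List.pyRange_neg_one_cons (by omega : (0:Int) < input)]
        simp [sumDesc]
    · rw [buildWeightArrayLoop]
      have hm : min (max (f - w) 0) (max input 0) = 0 := by omega
      rw [hm]
      simp only [sub_zero]
      simp [hin, sumDesc, PySem.List.pyRange_neg_one_eq_nil (by omega : input ≤ (0:Int))]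

lemma sumDesc_closed (M n : Int) (hM : 0 ≤ M) :
    sumDesc M.toNat (n - 1) = PySem.Int.floordiv (M * (2 * n - M - 1)) 2 := by
  have h2 : M * (2 * n - M - 1) = 2 * sumDesc M.toNat (n - 1) := by
    rw [two_mul_sumDesc M.toNat (n - 1)]
    have : (M.toNat : Int) = M := by omega
    rw [this]; ring
  rw [h2, PySem.Int.floordiv_eq_ediv_of_pos (by norm_num)]
  exact (Int.mul_ediv_cancel_left _ (by norm_num)).symm

-- ===== VERDICT (by name: the statement is the Claim_ definition above) =====
theorem buildWeightArray_spec : Claim_equal_buildWeightArray := by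
  intro input w _
  unfold Spec_buildWeightArray buildWeightArray buildWeightArray_alt
  rw [loop_eq (input - 1).toNat (input - 1) w input input [] (le_refl _)]
  have hmeq : min (max (input - w) 0) (max (input - 1) 0) =
      min (max (input - w) 0) (max (input - 1) 0) := rfl
  set M := min (max (input - w) 0) (max (input - 1) 0) with hM
  simp only [List.nil_append]
  rw [sumDesc_closed M input (by omega)]
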